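-- pv_equiv track=rewrite | github.com/resystem0/BNN | Core/miners/domain/corpus.py | _word_positions
-- ===== SOURCE A (Python) =====
-- def _word_positions(text: str) -> list[tuple[str, int, int]]:
--     """
--     Returns a list of (word, char_start, char_end) for each whitespace-
--     separated token in text. Used by the chunker to track character offsets.
--     """
--     positions = []
--     i = 0
--     for word in text.split():
--         start = text.index(word, i)
--         end   = start + len(word)
--         positions.append((word, start, end))
--         i = end
--     return positions
-- ===== SOURCE B (Python) =====
-- def _word_positions(text: str) -> list[tuple[str, int, int]]:
--     positions = []
--     cur = []  # characters of the token currently being read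
--     for i, ch in enumerate(text):
--         if ch.isspace():
--             if cur:
--                 positions.append((''.join(cur), i - len(cur), i))
--                 cur = []
--         else:
--             cur.append(ch)
--     if cur:
--         n = len(text)
--         positions.append((''.join(cur), n - len(cur), n))
--     return positions
-- ===== Notes on version B (the rewrite author's own statement) =====
-- stated objective: simpler
-- what changed: Replaced split()-then-repeated-index() substring re-searching with a single left-to-right character scan that accumulates the current token's characters and emits each (word, start, end) directly from the running index.
import Mathlib
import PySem

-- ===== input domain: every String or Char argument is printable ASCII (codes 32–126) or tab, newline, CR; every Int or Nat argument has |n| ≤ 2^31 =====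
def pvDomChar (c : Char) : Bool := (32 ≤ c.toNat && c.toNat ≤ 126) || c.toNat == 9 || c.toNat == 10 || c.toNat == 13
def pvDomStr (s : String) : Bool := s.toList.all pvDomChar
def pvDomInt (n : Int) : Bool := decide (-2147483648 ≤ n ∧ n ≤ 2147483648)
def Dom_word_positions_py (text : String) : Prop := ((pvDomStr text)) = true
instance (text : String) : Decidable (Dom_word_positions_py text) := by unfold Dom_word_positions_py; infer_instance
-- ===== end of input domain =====

-- B replaces A's split()-then-index() re-searching by a single left-to-right character
-- scan that tracks the current token's characters and offsets directly (objective: simpler one-pass structure).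

-- ===== PORT A =====
-- literal port of A: for word in text.split(): start = text.index(word, i) (ported as
-- PySem.Str.findFrom; the search never fails here, so the ValueError branch is unreachable)
def word_positions_py (text : String) : List (String × Int × Int) :=
  (((PySem.Str.split₀ text).foldl
    (fun (st : List (String × Int × Int) × Int) word =>
      let start := PySem.Str.findFrom text word st.2
      let e := start + PySem.Str.len word
      (st.1 ++ [(word, start, e)], e))
    ([], 0))).1

-- ===== PORT B =====
-- one pass over the characters with index i, accumulating the current token's chars (reversed)
def wordPositionsAltGo : List Char → Nat → List Char → List (String × Int × Int) → List (String × Int × Int)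
  | [], n, cur, acc =>
      if cur.isEmpty then acc
      else acc ++ [(String.ofList cur.reverse, (n : Int) - cur.length, (n : Int))]
  | c :: rest, i, cur, acc =>
      if PySem.Chars.isspace c then
        if cur.isEmpty then wordPositionsAltGo rest (i+1) [] acc
        else wordPositionsAltGo rest (i+1) []
               (acc ++ [(String.ofList cur.reverse, (i : Int) - cur.length, (i : Int))])
      else wordPositionsAltGo rest (i+1) (c :: cur) acc

def word_positions_py_alt (text : String) : List (String × Int × Int) :=
  wordPositionsAltGo text.toList 0 [] []

-- ===== PRECONDITION & SPEC =====
def Spec_word_positions_py (text : String) (out : List (String × Int × Int)) : Prop := out = word_positions_py_alt text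
instance (text : String) (out : List (String × Int × Int)) : Decidable (Spec_word_positions_py text out) := by unfold Spec_word_positions_py; infer_instance

-- ===== CLAIM (what is proved, stated in full; the proofs are below) =====
def Claim_equal_word_positions_py : Prop := ∀ (text : String), Dom_word_positions_py text → Spec_word_positions_py text (word_positions_py text)

-- ===== LEMMAS AND PROOFS =====

-- canonical tokenization both ports are reduced to
def wpScan : List Char → Nat → List (String × Int × Int)
  | [], _ => []
  | c :: rest, i =>
      if PySem.Chars.isspace c then wpScan rest (i+1)
      else
        let w := (c :: rest).takeWhile (fun d => !PySem.Chars.isspace d)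
        (String.ofList w, (i : Int), (i : Int) + w.length)
          :: wpScan ((c :: rest).dropWhile (fun d => !PySem.Chars.isspace d)) (i + w.length)
  termination_by s _ => s.length
  decreasing_by
  · simp
  · rename_i h
    have := List.length_dropWhile_le (fun d => !PySem.Chars.isspace d) rest
    simp [h]
    omega

theorem wpScan_nil (i : Nat) : wpScan [] i = [] := by simp [wpScan]

theorem wpScan_space {c : Char} (rest : List Char) (i : Nat) (h : PySem.Chars.isspace c = true) :
    wpScan (c :: rest) i = wpScan rest (i+1) := by rw [wpScan.eq_def]; simp [h]

theorem wpScan_tok {c : Char} (rest : List Char) (i : Nat) (h : PySem.Chars.isspace c = false) :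
    wpScan (c :: rest) i =
      (String.ofList (c :: rest.takeWhile (fun d => !PySem.Chars.isspace d)),
       (i : Int), (i : Int) + (1 + (rest.takeWhile (fun d => !PySem.Chars.isspace d)).length))
      :: wpScan (rest.dropWhile (fun d => !PySem.Chars.isspace d))
           (i + (1 + (rest.takeWhile (fun d => !PySem.Chars.isspace d)).length)) := by
  rw [wpScan.eq_def]
  simp [h, List.takeWhile_cons, List.dropWhile_cons]
  constructor
  · push_cast; ring
  · congr 1; omega

theorem altGo_spec : ∀ (s : List Char) (i : Nat) (cur : List Char) (acc : List (String × Int × Int)),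
    wordPositionsAltGo s i cur acc =
      acc ++ (if cur.isEmpty then wpScan s i
        else (String.ofList (cur.reverse ++ s.takeWhile (fun d => !PySem.Chars.isspace d)),
              (i : Int) - cur.length,
              (i : Int) + (s.takeWhile (fun d => !PySem.Chars.isspace d)).length)
          :: wpScan (s.dropWhile (fun d => !PySem.Chars.isspace d))
              (i + (s.takeWhile (fun d => !PySem.Chars.isspace d)).length)) := by
  intro s
  induction s with
  | nil =>
    intro i cur acc
    cases cur <;> simp [wordPositionsAltGo, wpScan_nil]
  | cons c rest ih =>
    intro i cur acc
    by_cases hc : PySem.Chars.isspace c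
    · cases cur with
      | nil =>
        simp [wordPositionsAltGo, hc, ih, wpScan_space rest i hc]
      | cons d ds =>
        simp only [wordPositionsAltGo, hc, if_true, List.isEmpty_cons, Bool.false_eq_true, if_false,
          ih, List.isEmpty_nil, if_true]
        simp [List.takeWhile_cons, List.dropWhile_cons, hc, wpScan_space rest i hc]
    · replace hc : PySem.Chars.isspace c = false := by simpa using hc
      cases cur with
      | nil =>
        simp only [wordPositionsAltGo, hc, Bool.false_eq_true, if_false, ih,
          List.isEmpty_cons, List.isEmpty_nil, if_true]
        rw [wpScan_tok rest i hc]
        simp [List.takeWhile_cons, List.dropWhile_cons, hc]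
        exact ⟨by ring, by congr 1; omega⟩
      | cons d ds =>
        simp only [wordPositionsAltGo, hc, Bool.false_eq_true, if_false, ih, List.isEmpty_cons]
        simp [List.takeWhile_cons, List.dropWhile_cons, hc]
        exact ⟨by ring, by congr 1; omega⟩

theorem split₀_go_spec : ∀ (s cur : List Char) (acc : List (List Char)),
    PySem.Chars.split₀.go s cur acc =
      acc.reverse ++ (if cur.isEmpty then PySem.Chars.split₀ s
        else (cur.reverse ++ s.takeWhile (fun d => !PySem.Chars.isspace d))
          :: PySem.Chars.split₀ (s.dropWhile (fun d => !PySem.Chars.isspace d))) := by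
  intro s
  induction s with
  | nil =>
    intro cur acc
    rw [PySem.Chars.split₀.go.eq_def]
    cases cur <;> simp [PySem.Chars.split₀, PySem.Chars.split₀.go.eq_def]
  | cons c rest ih =>
    intro cur acc
    rw [PySem.Chars.split₀.go.eq_def]
    have hsr : PySem.Chars.split₀ (c :: rest) = PySem.Chars.split₀.go rest
        (if PySem.Chars.isspace c then [] else [c]) [] := by
      show PySem.Chars.split₀.go _ _ _ = _
      rw [PySem.Chars.split₀.go.eq_def]
      by_cases hc : PySem.Chars.isspace c <;> simp [hc]
    by_cases hc : PySem.Chars.isspace c = true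
    · rw [if_pos hc] at hsr
      have hsplit : PySem.Chars.split₀ (c :: rest) = PySem.Chars.split₀ rest := by
        rw [hsr, ih]; simp
      cases cur with
      | nil => simp [hc, hsplit, ih]
      | cons d ds => simp [ih, List.takeWhile_cons, List.dropWhile_cons, hc, hsplit]
    · replace hc : PySem.Chars.isspace c = false := by simpa using hc
      rw [if_neg (by simp [hc])] at hsr
      have hsplit : PySem.Chars.split₀ (c :: rest) =
          (c :: rest.takeWhile (fun d => !PySem.Chars.isspace d)) ::
            PySem.Chars.split₀ (rest.dropWhile (fun d => !PySem.Chars.isspace d)) := by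
        rw [hsr, ih]; simp
      cases cur with
      | nil => simp [ih, List.takeWhile_cons, List.dropWhile_cons, hc, hsplit]
      | cons d ds => simp [ih, List.takeWhile_cons, List.dropWhile_cons, hc, hsplit]

theorem split₀_skip (u : List Char) :
    PySem.Chars.split₀ u = PySem.Chars.split₀ (u.dropWhile PySem.Chars.isspace) := by
  induction u with
  | nil => simp
  | cons c rest ih =>
    by_cases hc : PySem.Chars.isspace c
    · rw [List.dropWhile_cons_of_pos (by simpa using hc), ← ih]
      show PySem.Chars.split₀.go _ _ _ = _
      rw [PySem.Chars.split₀.go.eq_def]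
      simp [hc, PySem.Chars.split₀]
    · rw [List.dropWhile_cons_of_neg (by simpa using hc)]

theorem wpScan_skip (u : List Char) (i : Nat) :
    wpScan u i = wpScan (u.dropWhile PySem.Chars.isspace) (i + (u.takeWhile PySem.Chars.isspace).length) := by
  induction u generalizing i with
  | nil => simp
  | cons c rest ih =>
    by_cases hc : PySem.Chars.isspace c
    · rw [List.dropWhile_cons_of_pos (by simpa using hc), List.takeWhile_cons_of_pos (by simpa using hc),
        wpScan_space rest i hc, ih]
      congr 1
      simp; omega
    · rw [List.dropWhile_cons_of_neg (by simpa using hc), List.takeWhile_cons_of_neg (by simpa using hc)]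
      simp

theorem dropWhile_eq_drop_tw (p : Char → Bool) (l : List Char) :
    l.drop (l.takeWhile p).length = l.dropWhile p := by
  have h := List.drop_left (l₁ := l.takeWhile p) (l₂ := l.dropWhile p)
  rwa [List.takeWhile_append_dropWhile] at h

theorem find_first (u w : List Char) (g : Nat) (hocc : w <+: u.drop g)
    (hmin : ∀ j, j < g → ¬ w <+: u.drop j) : PySem.Chars.find u w = (g : Int) := by
  have hinf : w <:+: u := hocc.isInfix.trans (List.drop_suffix g u).isInfix
  have h0 : 0 ≤ PySem.Chars.find u w := (PySem.Chars.find_nonneg_iff (s := u) (sub := w)).mpr hinf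
  obtain ⟨h1, h2⟩ := PySem.Chars.find_spec h0
  have hfg : (PySem.Chars.find u w).toNat = g := by
    rcases Nat.lt_trichotomy (PySem.Chars.find u w).toNat g with h|h|h
    · exact absurd h1 (hmin _ h)
    · exact h
    · exact absurd hocc (h2 g h)
  omega

theorem split₀_cons_nonspace {c : Char} {rest : List Char} (hc : PySem.Chars.isspace c = false) :
    PySem.Chars.split₀ (c :: rest) =
      (c :: rest.takeWhile (fun d => !PySem.Chars.isspace d)) ::
        PySem.Chars.split₀ (rest.dropWhile (fun d => !PySem.Chars.isspace d)) := by
  show PySem.Chars.split₀.go _ _ _ = _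
  rw [PySem.Chars.split₀.go.eq_def]
  simp [hc, split₀_go_spec]

-- A's fold equals wpScan
theorem foldA_spec (text : String) : ∀ (n k : Nat) (acc : List (String × Int × Int)) (ws : List String),
    text.toList.length - k ≤ n → k ≤ text.toList.length →
    ws.map String.toList = PySem.Chars.split₀ (text.toList.drop k) →
    (ws.foldl
      (fun (st : List (String × Int × Int) × Int) word =>
        let start := PySem.Str.findFrom text word st.2
        let e := start + PySem.Str.len word
        (st.1 ++ [(word, start, e)], e))
      (acc, (k : Int))).1 = acc ++ wpScan (text.toList.drop k) k := by
  intro n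
  induction n with
  | zero =>
    intro k acc ws h1 h2 hws
    have hu : text.toList.drop k = [] := by
      have h0 : (text.toList.drop k).length = 0 := by rw [List.length_drop]; omega
      exact List.eq_nil_of_length_eq_zero h0
    rw [hu] at hws ⊢
    have hws' : ws = [] := by
      cases ws with
      | nil => rfl
      | cons a t => simp [PySem.Chars.split₀, PySem.Chars.split₀.go] at hws
    subst hws'
    simp [wpScan_nil]
  | succ n ih =>
    intro k acc ws h1 h2 hws
    set s := text.toList with hs
    set u := s.drop k with hu
    set g := (u.takeWhile PySem.Chars.isspace).length with hg
    set v := u.dropWhile PySem.Chars.isspace with hv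
    have hdropg : u.drop g = v := by rw [hv, hg]; exact dropWhile_eq_drop_tw _ _
    have hsplitv : PySem.Chars.split₀ u = PySem.Chars.split₀ v := split₀_skip u
    have hscan : wpScan u k = wpScan v (k + g) := wpScan_skip u k
    have hglen : g ≤ u.length := by rw [hg]; simpa using (List.takeWhile_sublist _).length_le
    have hulen : u.length = s.length - k := by rw [hu]; simp
    cases hv2 : v with
    | nil =>
      have hws' : ws = [] := by
        rw [hsplitv, hv2] at hws
        cases ws with
        | nil => rfl
        | cons a t => simp [PySem.Chars.split₀, PySem.Chars.split₀.go] at hws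
      subst hws'
      simp [hscan, hv2, wpScan_nil]
    | cons c rest =>
      have hd : u.dropWhile PySem.Chars.isspace = c :: rest := by rw [← hv]; exact hv2
      have hc : PySem.Chars.isspace c = false := by
        have hnot := List.dropWhile_get_zero_not (p := PySem.Chars.isspace) u (by rw [hd]; simp)
        simpa [hd] using hnot
      set w := v.takeWhile (fun d => !PySem.Chars.isspace d) with hw
      have hwc : w = c :: rest.takeWhile (fun d => !PySem.Chars.isspace d) := by
        rw [hw, hv2]; simp [List.takeWhile_cons, hc]
      have hsplit : PySem.Chars.split₀ u =
          w :: PySem.Chars.split₀ (rest.dropWhile (fun d => !PySem.Chars.isspace d)) := by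
        rw [hsplitv, hv2, split₀_cons_nonspace hc, ← hwc]
      obtain ⟨w', ws', rfl⟩ : ∃ w' ws', ws = w' :: ws' := by
        cases ws with
        | nil => rw [hsplit] at hws; simp at hws
        | cons a t => exact ⟨a, t, rfl⟩
      rw [hsplit] at hws
      simp only [List.map_cons, List.cons.injEq] at hws
      obtain ⟨hws1, hws2⟩ := hws
      -- the index() call finds exactly the token start k+g
      have hocc : w <+: u.drop g := by rw [hdropg, hw]; exact List.takeWhile_prefix _
      have hmin : ∀ j, j < g → ¬ w <+: u.drop j := by
        intro j hj hpre
        have hhead : (u.drop j).head? = some c := by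
          rw [hwc] at hpre
          obtain ⟨r, hr⟩ := hpre
          rw [← hr]; simp
        have hj' : u[j]? = some c := by rw [← List.head?_drop]; exact hhead
        have hjt : j < (u.takeWhile PySem.Chars.isspace).length := by omega
        have hpref := List.takeWhile_prefix (p := PySem.Chars.isspace) (l := u)
        obtain ⟨r, hr⟩ := hpref
        have : (u.takeWhile PySem.Chars.isspace)[j]? = some c := by
          rw [← hr] at hj'
          rwa [List.getElem?_append_left hjt] at hj'
        have hmem : c ∈ u.takeWhile PySem.Chars.isspace := List.mem_of_getElem? this
        have := List.mem_takeWhile_imp hmem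
        simp [hc] at this
      have hfind : PySem.Chars.find u w = (g : Int) := find_first u w g hocc hmin
      have hfF : PySem.Chars.findFrom s w (k : Int) none = ((k + g : Nat) : Int) := by
        rw [PySem.Chars.findFrom_natCast s w k (by omega), ← hu, hfind,
          if_neg (by omega : ((g : Int)) ≠ -1)]
        push_cast; ring
      have hstart : PySem.Str.findFrom text w' (k : Int) = ((k + g : Nat) : Int) := by
        rw [PySem.Str.findFrom_eq, hws1, ← hs, hfF]
      have hlenw : PySem.Str.len w' = (w.length : Int) := by
        simp [PySem.Str.len, ← hws1]
      -- lengths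
      have hw1 : 1 ≤ w.length := by rw [hwc]; simp
      have hvlen : v.length = u.length - g := by rw [← hdropg]; simp
      have hwlen_le : w.length ≤ v.length := by
        rw [hw]; simpa using (List.takeWhile_sublist _).length_le
      have hk' : k + g + w.length ≤ s.length := by omega
      have hdrop' : s.drop (k + g + w.length) = rest.dropWhile (fun d => !PySem.Chars.isspace d) := by
        have h1' : s.drop (k + g + w.length) = v.drop w.length := by
          rw [← hdropg, hu]
          rw [List.drop_drop, List.drop_drop]
          congr 1
          omega
        have h2' : v.dropWhile (fun d => !PySem.Chars.isspace d)
            = rest.dropWhile (fun d => !PySem.Chars.isspace d) := by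
          rw [hv2]; exact List.dropWhile_cons_of_pos (by simp [hc])
        have h3' := dropWhile_eq_drop_tw (fun d => !PySem.Chars.isspace d) v
        rw [h1', ← h2', ← h3', ← hw]
      have hih := ih (k + g + w.length)
        (acc ++ [(w', ((k + g : Nat) : Int), ((k + g : Nat) : Int) + (w.length : Int))]) ws'
        (by omega) hk' (by rw [hdrop']; exact hws2)
      simp only [List.foldl_cons, hstart, hlenw]
      have hcast : ((k + g : Nat) : Int) + (w.length : Int) = ((k + g + w.length : Nat) : Int) := by
        push_cast; ring
      rw [hcast] at hih ⊢
      rw [hih, hscan, hv2, wpScan_tok rest (k + g) hc]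
      have hlen2 : w.length = 1 + (rest.takeWhile (fun d => !PySem.Chars.isspace d)).length := by
        rw [hwc]; simp [Nat.add_comm]
      have hof : String.ofList (c :: rest.takeWhile (fun d => !PySem.Chars.isspace d)) = w' := by
        rw [← hwc, ← hws1]; simp
      have hidx : k + g + (1 + (rest.takeWhile (fun d => !PySem.Chars.isspace d)).length)
          = k + g + w.length := by omega
      have hcast2 : ((k + g : Nat) : Int) + (1 + ((rest.takeWhile (fun d => !PySem.Chars.isspace d)).length : Int))
          = ((k + g + w.length : Nat) : Int) := by push_cast; omega
      rw [hof, hidx, hcast2, ← hdrop']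
      simp

-- ===== VERDICT (by name: the statement is the Claim_ definition above) =====
theorem word_positions_py_spec : Claim_equal_word_positions_py := by
  intro text _
  unfold Spec_word_positions_py word_positions_py word_positions_py_alt
  rw [altGo_spec]
  simp only [List.isEmpty_nil, if_true, List.nil_append]
  have h := foldA_spec text text.toList.length 0 [] (PySem.Str.split₀ text)
    (by omega) (by omega) (by simpa using PySem.Str.split₀_map_toList text)
  simpa using h
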